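-- pv_equiv track=rewrite | github.com/Torfab/adventOfCodeAndOtherEvents | adventOfCode/2023/day22.py | checkIfDown
-- ===== SOURCE A (Python) =====
-- def checkIfDown(zMin, blocks, towerGrid):
--
--   zMin=zMin-1
--   i=0
--   while(zMin>0):
--     i=i+1
--     for element in blocks:
--       if (towerGrid.get((element[0], element[1], zMin))!=None):
--         return min(1, i-1), i-1
--     zMin=zMin-1
--   return min(1, i), i
-- ===== SOURCE B (Python) =====
-- def checkIfDown(zMin, blocks, towerGrid):
--     cols = {(b[0], b[1]) for b in blocks}
--     best = 0
--     for (x, y, z) in towerGrid: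
--         if 1 <= z < zMin and (x, y) in cols and best < z:
--             best = z
--     d = max(0, zMin - 1 - best)
--     return min(1, d), d
-- ===== Notes on version B (the rewrite author's own statement) =====
-- stated objective: faster
-- what changed: Replaces A's level-by-level downward probing (each level rescanning blocks against the grid) with one pass over the grid entries tracking the highest occupied supporting level below zMin, then a closed-form drop distance.
import Mathlib
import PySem

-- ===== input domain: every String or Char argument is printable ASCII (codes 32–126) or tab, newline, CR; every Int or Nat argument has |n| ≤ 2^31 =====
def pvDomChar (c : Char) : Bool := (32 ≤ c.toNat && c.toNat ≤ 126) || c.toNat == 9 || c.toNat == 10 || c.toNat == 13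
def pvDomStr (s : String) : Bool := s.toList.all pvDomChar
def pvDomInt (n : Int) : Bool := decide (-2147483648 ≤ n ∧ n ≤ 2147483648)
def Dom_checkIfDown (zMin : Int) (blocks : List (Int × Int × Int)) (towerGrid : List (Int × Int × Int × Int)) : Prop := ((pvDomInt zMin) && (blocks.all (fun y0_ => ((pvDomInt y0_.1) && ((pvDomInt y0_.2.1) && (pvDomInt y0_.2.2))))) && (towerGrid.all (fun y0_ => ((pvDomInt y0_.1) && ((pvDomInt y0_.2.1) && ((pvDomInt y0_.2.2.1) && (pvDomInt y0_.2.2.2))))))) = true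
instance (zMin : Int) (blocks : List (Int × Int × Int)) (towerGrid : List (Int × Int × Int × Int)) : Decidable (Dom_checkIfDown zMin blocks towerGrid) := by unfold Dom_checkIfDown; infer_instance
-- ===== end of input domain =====

-- B replaces A's level-by-level downward probe with one pass over the grid plus a closed-form
-- drop distance (faster: one scan of the grid instead of up to zMin scans of blocks).

-- ===== PORT A =====
-- for element in blocks: if towerGrid.get((element[0],element[1],zMin)) != None: …
def chkHit (blocks : List (Int × Int × Int)) (grid : PySem.Dict (Int × Int × Int) Int) (z : Int) : Bool :=
  blocks.any (fun e => (grid.get? (e.1, e.2.1, z)).isSome)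

-- the while(zMin>0) loop of A, carrying the same state (zMin, i)
def chkLoop (blocks : List (Int × Int × Int)) (grid : PySem.Dict (Int × Int × Int) Int) (zMin i : Int) : Int × Int :=
  if 0 < zMin then
    let i' := i + 1
    if chkHit blocks grid zMin then (min 1 (i' - 1), i' - 1)
    else chkLoop blocks grid (zMin - 1) i'
  else (min 1 i, i)
termination_by zMin.toNat
decreasing_by omega

def checkIfDown (zMin : Int) (blocks : List (Int × Int × Int)) (towerGrid : List (Int × Int × Int × Int)) : Int × Int :=
  chkLoop blocks (PySem.Dict.mk (towerGrid.map (fun e => ((e.1, e.2.1, e.2.2.1), e.2.2.2)))) (zMin - 1) 0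

-- ===== PORT B =====
def checkIfDown_alt (zMin : Int) (blocks : List (Int × Int × Int)) (towerGrid : List (Int × Int × Int × Int)) : Int × Int :=
  let cols : PySem.Set (Int × Int) := PySem.Set.ofList (blocks.map (fun b => (b.1, b.2.1)))
  let best : Int := towerGrid.foldl
    (fun best e =>
      if 1 ≤ e.2.2.1 ∧ e.2.2.1 < zMin ∧ PySem.Set.contains cols (e.1, e.2.1) ∧ best < e.2.2.1
      then e.2.2.1 else best) 0
  let d : Int := max 0 (zMin - 1 - best)
  (min 1 d, d)

-- ===== PRECONDITION & SPEC =====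
def Spec_checkIfDown (zMin : Int) (blocks : List (Int × Int × Int)) (towerGrid : List (Int × Int × Int × Int)) (out : Int × Int) : Prop := out = checkIfDown_alt zMin blocks towerGrid
instance (zMin : Int) (blocks : List (Int × Int × Int)) (towerGrid : List (Int × Int × Int × Int)) (out : Int × Int) : Decidable (Spec_checkIfDown zMin blocks towerGrid out) := by unfold Spec_checkIfDown; infer_instance

-- ===== CLAIM (what is proved, stated in full; the proofs are below) =====
def Claim_equal_checkIfDown : Prop := ∀ (zMin : Int) (blocks : List (Int × Int × Int)) (towerGrid : List (Int × Int × Int × Int)), Dom_checkIfDown zMin blocks towerGrid → Spec_checkIfDown zMin blocks towerGrid (checkIfDown zMin blocks towerGrid)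

-- ===== LEMMAS AND PROOFS =====

-- the highest level z with 1 ≤ z ≤ t at which A's probe hits (0 if none): A's loop walks down to it
def bestUpTo (blocks : List (Int × Int × Int)) (grid : PySem.Dict (Int × Int × Int) Int) (t : Int) : Int :=
  if 0 < t then (if chkHit blocks grid t then t else bestUpTo blocks grid (t - 1)) else 0
termination_by t.toNat
decreasing_by omega

theorem bestUpTo_bounds (blocks : List (Int × Int × Int)) (grid : PySem.Dict (Int × Int × Int) Int) (t : Int) :
    0 ≤ bestUpTo blocks grid t ∧ bestUpTo blocks grid t ≤ max 0 t := by
  induction hn : t.toNat generalizing t with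
  | zero =>
      rw [bestUpTo, if_neg (by omega : ¬ 0 < t)]
      omega
  | succ n ih =>
      rw [bestUpTo, if_pos (by omega : 0 < t)]
      by_cases hh : chkHit blocks grid t = true
      · rw [if_pos hh]; omega
      · rw [if_neg hh]
        have := ih (t - 1) (by omega)
        omega

theorem chkLoop_closed (blocks : List (Int × Int × Int)) (grid : PySem.Dict (Int × Int × Int) Int) (t i : Int) :
    chkLoop blocks grid t i =
      (min 1 (i + max 0 (t - bestUpTo blocks grid t)), i + max 0 (t - bestUpTo blocks grid t)) := by
  induction hn : t.toNat generalizing t i with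
  | zero =>
      rw [chkLoop, if_neg (by omega : ¬ 0 < t), bestUpTo, if_neg (by omega : ¬ 0 < t)]
      have : max 0 (t - 0) = 0 := by omega
      rw [this]; simp
  | succ n ih =>
      rw [chkLoop, if_pos (by omega : 0 < t), bestUpTo, if_pos (by omega : 0 < t)]
      by_cases hh : chkHit blocks grid t = true
      · rw [if_pos hh, if_pos hh]
        have h0 : max 0 (t - t) = 0 := by omega
        rw [h0]
        have h1 : i + 1 - 1 = i + 0 := by omega
        rw [h1]
      · rw [if_neg hh, if_neg hh]
        rw [ih (t - 1) (i + 1) (by omega)]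
        have hb := bestUpTo_bounds blocks grid (t - 1)
        have h1 : i + 1 + max 0 (t - 1 - bestUpTo blocks grid (t - 1)) = i + max 0 (t - bestUpTo blocks grid (t - 1)) := by omega
        rw [h1]

-- the key-existence reading of Dict.get? on a literal dict
theorem get?_mk_isSome {κ ν : Type} [BEq κ] [LawfulBEq κ] (l : List (κ × ν)) (k : κ) :
    (PySem.Dict.get? (PySem.Dict.mk l) k).isSome = true ↔ ∃ p ∈ l, p.1 = k := by
  induction l with
  | nil => simp [PySem.Dict.get?]
  | cons p rest ih =>
      rw [PySem.Dict.get?_mk_cons]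
      by_cases h : p.1 = k
      · simp [h]
      · simp only [beq_iff_eq, h, if_false, ih, List.mem_cons]
        constructor
        · rintro ⟨q, hq, hk⟩; exact ⟨q, Or.inr hq, hk⟩
        · rintro ⟨q, hq | hq, hk⟩
          · subst hq; exact absurd hk h
          · exact ⟨q, hq, hk⟩

-- the occupancy predicate both programs test, phrased on the raw inputs
def Occ (zMin : Int) (blocks : List (Int × Int × Int)) (towerGrid : List (Int × Int × Int × Int)) (z : Int) : Prop :=
  ∃ e ∈ towerGrid, e.2.2.1 = z ∧ (e.1, e.2.1) ∈ blocks.map (fun b => (b.1, b.2.1)) ∧ z < zMin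

theorem chkHit_iff (zMin : Int) (blocks : List (Int × Int × Int)) (towerGrid : List (Int × Int × Int × Int)) (z : Int) (hz : z < zMin) :
    chkHit blocks (PySem.Dict.mk (towerGrid.map (fun e => ((e.1, e.2.1, e.2.2.1), e.2.2.2)))) z = true
      ↔ Occ zMin blocks towerGrid z := by
  unfold chkHit Occ
  simp only [List.any_eq_true, get?_mk_isSome, List.mem_map]
  constructor
  · rintro ⟨b, hb, ⟨p, ⟨e, he, rfl⟩, hk⟩⟩
    refine ⟨e, he, ?_, ⟨b, hb, ?_⟩, hz⟩
    · exact congrArg (fun t => t.2.2) hk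
    · have h1 := congrArg (fun t => t.1) hk
      have h2 := congrArg (fun t => t.2.1) hk
      simp at h1 h2; simp [h1, h2]
  · rintro ⟨e, he, hez, ⟨b, hb, hxy⟩, _⟩
    refine ⟨b, hb, ⟨((e.1, e.2.1, e.2.2.1), e.2.2.2), ⟨e, he, rfl⟩, ?_⟩⟩
    have h1 := congrArg Prod.fst hxy
    have h2 := congrArg Prod.snd hxy
    simp at h1 h2
    simp [h1, h2, hez]

-- B's fold computes the maximum z with Occ z ∧ 1 ≤ z (0 if none), for any starting accumulator
theorem fold_best_spec (zMin : Int) (blocks : List (Int × Int × Int)) (l : List (Int × Int × Int × Int)) (acc : Int) :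
    acc ≤ l.foldl (fun best e =>
        if 1 ≤ e.2.2.1 ∧ e.2.2.1 < zMin ∧ PySem.Set.contains (PySem.Set.ofList (blocks.map (fun b => (b.1, b.2.1)))) (e.1, e.2.1) = true ∧ best < e.2.2.1
        then e.2.2.1 else best) acc ∧
    (l.foldl (fun best e =>
        if 1 ≤ e.2.2.1 ∧ e.2.2.1 < zMin ∧ PySem.Set.contains (PySem.Set.ofList (blocks.map (fun b => (b.1, b.2.1)))) (e.1, e.2.1) = true ∧ best < e.2.2.1
        then e.2.2.1 else best) acc = acc ∨
      (∃ e ∈ l, 1 ≤ e.2.2.1 ∧ e.2.2.1 < zMin ∧ (e.1, e.2.1) ∈ blocks.map (fun b => (b.1, b.2.1)) ∧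
        l.foldl (fun best e =>
          if 1 ≤ e.2.2.1 ∧ e.2.2.1 < zMin ∧ PySem.Set.contains (PySem.Set.ofList (blocks.map (fun b => (b.1, b.2.1)))) (e.1, e.2.1) = true ∧ best < e.2.2.1
          then e.2.2.1 else best) acc = e.2.2.1)) ∧
    (∀ e ∈ l, 1 ≤ e.2.2.1 → e.2.2.1 < zMin → (e.1, e.2.1) ∈ blocks.map (fun b => (b.1, b.2.1)) →
      e.2.2.1 ≤ l.foldl (fun best e =>
        if 1 ≤ e.2.2.1 ∧ e.2.2.1 < zMin ∧ PySem.Set.contains (PySem.Set.ofList (blocks.map (fun b => (b.1, b.2.1)))) (e.1, e.2.1) = true ∧ best < e.2.2.1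
        then e.2.2.1 else best) acc) := by
  have hmem : ∀ p : Int × Int, PySem.Set.contains (PySem.Set.ofList (blocks.map (fun b => (b.1, b.2.1)))) p = true ↔ p ∈ blocks.map (fun b => (b.1, b.2.1)) := by
    intro p
    simp [PySem.Set.mem_ofList]
  induction l generalizing acc with
  | nil => simp
  | cons e rest ih =>
      simp only [List.foldl_cons]
      by_cases hc : 1 ≤ e.2.2.1 ∧ e.2.2.1 < zMin ∧ PySem.Set.contains (PySem.Set.ofList (blocks.map (fun b => (b.1, b.2.1)))) (e.1, e.2.1) = true ∧ acc < e.2.2.1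
      · rw [if_pos hc]
        obtain ⟨h1, h2, h3, h4⟩ := hc
        obtain ⟨ha, hb, hcc⟩ := ih e.2.2.1
        refine ⟨by omega, ?_, ?_⟩
        · rcases hb with hb | ⟨f, hf, hf1, hf2, hf3, hf4⟩
          · exact Or.inr ⟨e, List.mem_cons_self .., h1, h2, (hmem _).1 h3, hb⟩
          · exact Or.inr ⟨f, List.mem_cons_of_mem _ hf, hf1, hf2, hf3, hf4⟩
        · intro f hf hf1 hf2 hf3
          rcases List.mem_cons.1 hf with rfl | hf
          · omega
          · exact hcc f hf hf1 hf2 hf3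
      · obtain ⟨ha, hb, hcc⟩ := ih acc
        rw [if_neg hc]
        refine ⟨ha, ?_, ?_⟩
        · rcases hb with hb | ⟨f, hf, hf1, hf2, hf3, hf4⟩
          · exact Or.inl hb
          · exact Or.inr ⟨f, List.mem_cons_of_mem _ hf, hf1, hf2, hf3, hf4⟩
        · intro f hf hf1 hf2 hf3
          rcases List.mem_cons.1 hf with rfl | hf
          · by_cases h4 : acc < f.2.2.1
            · exact absurd ⟨hf1, hf2, (hmem _).2 hf3, h4⟩ hc
            · omega
          · exact hcc f hf hf1 hf2 hf3

-- bestUpTo is the same maximum (with the grid built as in port A)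
theorem bestUpTo_spec (zMin : Int) (blocks : List (Int × Int × Int)) (towerGrid : List (Int × Int × Int × Int)) (t : Int) (ht : t < zMin) :
    (bestUpTo blocks (PySem.Dict.mk (towerGrid.map (fun e => ((e.1, e.2.1, e.2.2.1), e.2.2.2)))) t = 0 ∨
      (1 ≤ bestUpTo blocks (PySem.Dict.mk (towerGrid.map (fun e => ((e.1, e.2.1, e.2.2.1), e.2.2.2)))) t ∧
       bestUpTo blocks (PySem.Dict.mk (towerGrid.map (fun e => ((e.1, e.2.1, e.2.2.1), e.2.2.2)))) t ≤ t ∧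
       Occ zMin blocks towerGrid (bestUpTo blocks (PySem.Dict.mk (towerGrid.map (fun e => ((e.1, e.2.1, e.2.2.1), e.2.2.2)))) t))) ∧
      (∀ z, 1 ≤ z → z ≤ t → Occ zMin blocks towerGrid z →
        z ≤ bestUpTo blocks (PySem.Dict.mk (towerGrid.map (fun e => ((e.1, e.2.1, e.2.2.1), e.2.2.2)))) t) := by
  induction hn : t.toNat generalizing t with
  | zero =>
      rw [bestUpTo, if_neg (by omega : ¬ 0 < t)]
      exact ⟨Or.inl rfl, fun z h1 h2 _ => by omega⟩
  | succ n ih =>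
      rw [bestUpTo, if_pos (by omega : 0 < t)]
      by_cases hh : chkHit blocks (PySem.Dict.mk (towerGrid.map (fun e => ((e.1, e.2.1, e.2.2.1), e.2.2.2)))) t = true
      · rw [if_pos hh]
        exact ⟨Or.inr ⟨by omega, le_refl _, (chkHit_iff zMin blocks towerGrid t ht).1 hh⟩,
          fun z h1 h2 _ => h2⟩
      · rw [if_neg hh]
        obtain ⟨ha, hb⟩ := ih (t - 1) (by omega) (by omega)
        refine ⟨?_, ?_⟩
        · rcases ha with ha | ⟨h1, h2, h3⟩
          · exact Or.inl ha
          · exact Or.inr ⟨h1, by omega, h3⟩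
        · intro z h1 h2 hocc
          by_cases hz : z = t
          · subst hz
            exact absurd ((chkHit_iff zMin blocks towerGrid z ht).2 hocc) hh
          · exact hb z h1 (by omega) hocc

theorem best_eq (zMin : Int) (blocks : List (Int × Int × Int)) (towerGrid : List (Int × Int × Int × Int)) :
    towerGrid.foldl (fun best e =>
      if 1 ≤ e.2.2.1 ∧ e.2.2.1 < zMin ∧ PySem.Set.contains (PySem.Set.ofList (blocks.map (fun b => (b.1, b.2.1)))) (e.1, e.2.1) = true ∧ best < e.2.2.1
      then e.2.2.1 else best) 0
    = bestUpTo blocks (PySem.Dict.mk (towerGrid.map (fun e => ((e.1, e.2.1, e.2.2.1), e.2.2.2)))) (zMin - 1) := by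
  obtain ⟨hf0, hf1, hf2⟩ := fold_best_spec zMin blocks towerGrid 0
  obtain ⟨hb1, hb2⟩ := bestUpTo_spec zMin blocks towerGrid (zMin - 1) (by omega)
  have hFB : towerGrid.foldl (fun best e =>
      if 1 ≤ e.2.2.1 ∧ e.2.2.1 < zMin ∧ PySem.Set.contains (PySem.Set.ofList (blocks.map (fun b => (b.1, b.2.1)))) (e.1, e.2.1) = true ∧ best < e.2.2.1
      then e.2.2.1 else best) 0
      ≤ bestUpTo blocks (PySem.Dict.mk (towerGrid.map (fun e => ((e.1, e.2.1, e.2.2.1), e.2.2.2)))) (zMin - 1) := by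
    rcases hf1 with h | ⟨e, he, h1, h2, h3, h4⟩
    · rcases hb1 with h' | ⟨hb1', _, _⟩ <;> omega
    · rw [h4]
      exact hb2 e.2.2.1 h1 (by omega) ⟨e, he, rfl, h3, h2⟩
  have hBF : bestUpTo blocks (PySem.Dict.mk (towerGrid.map (fun e => ((e.1, e.2.1, e.2.2.1), e.2.2.2)))) (zMin - 1)
      ≤ towerGrid.foldl (fun best e =>
      if 1 ≤ e.2.2.1 ∧ e.2.2.1 < zMin ∧ PySem.Set.contains (PySem.Set.ofList (blocks.map (fun b => (b.1, b.2.1)))) (e.1, e.2.1) = true ∧ best < e.2.2.1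
      then e.2.2.1 else best) 0 := by
    rcases hb1 with h | ⟨h1, h2, e, he, hez, hcols, hlt⟩
    · omega
    · have := hf2 e he (by omega) (by omega) hcols
      omega
  omega

-- ===== VERDICT (by name: the statement is the Claim_ definition above) =====
theorem checkIfDown_spec : Claim_equal_checkIfDown := by
  intro zMin blocks towerGrid _
  unfold Spec_checkIfDown checkIfDown checkIfDown_alt
  simp only []
  rw [chkLoop_closed, best_eq]
  have h1 : ∀ m : Int, (0 : Int) + m = m := by omega
  simp only [h1]
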